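-- pv_equiv track=rewrite | github.com/odanilosalve/searching_username | sherlock_project/sherlock.py | build_site_data
-- ===== SOURCE A (Python) =====
-- def build_site_data(site_data_all, site_list) -> tuple:
--     """Build filtered site data and collect missing sites."""
--     site_data = {}
--     site_missing = []
--
--     for site in site_list:
--         counter = 0
--         for existing_site in site_data_all:
--             if site.lower() == existing_site.lower():
--                 site_data[existing_site] = site_data_all[existing_site]
--                 counter += 1
--         if counter == 0:
--             site_missing.append(f"'{site}'")
--
--     return site_data, site_missing
-- ===== SOURCE B (Python) =====
-- def build_site_data(site_data_all, site_list):
--     """Build filtered site data and collect missing sites."""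
--     # One-time lowercase index: lowered key -> original keys in data order.
--     index = {}
--     for k in site_data_all:
--         index.setdefault(k.lower(), []).append(k)
--
--     site_data = {}
--     site_missing = []
--     for site in site_list:
--         keys = index.get(site.lower(), [])
--         if not keys:
--             site_missing.append(f"'{site}'")
--         else:
--             for k in keys:
--                 site_data[k] = site_data_all[k]
--     return site_data, site_missing
-- ===== Notes on version B (the rewrite author's own statement) =====
-- stated objective: faster
-- what changed: Builds a lowercase-key index dict once, so each site is resolved by one hash lookup instead of a scan over the whole site dict.
import Mathlib
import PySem

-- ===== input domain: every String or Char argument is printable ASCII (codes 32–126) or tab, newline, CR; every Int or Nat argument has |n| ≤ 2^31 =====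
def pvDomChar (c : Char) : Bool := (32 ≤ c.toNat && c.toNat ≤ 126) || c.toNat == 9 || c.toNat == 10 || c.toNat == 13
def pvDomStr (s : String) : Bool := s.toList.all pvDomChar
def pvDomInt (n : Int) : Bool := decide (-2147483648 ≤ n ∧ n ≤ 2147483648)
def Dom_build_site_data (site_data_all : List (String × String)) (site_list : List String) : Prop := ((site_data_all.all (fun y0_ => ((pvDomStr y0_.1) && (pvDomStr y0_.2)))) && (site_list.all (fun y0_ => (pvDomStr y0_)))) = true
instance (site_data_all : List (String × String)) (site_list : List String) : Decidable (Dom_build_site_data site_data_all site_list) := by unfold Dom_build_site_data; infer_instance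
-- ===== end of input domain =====

-- B replaces A's per-site scan of the whole site dict by a lowercase-key index built once (objective: faster).

-- ===== PORT A =====
-- A iterates site_list; for each site it scans all keys of site_data_all, inserting
-- case-insensitive matches and counting them; counter == 0 records the site as missing.
def build_site_data (site_data_all : List (String × String)) (site_list : List String) :
    (List (String × String)) × List String :=
  let d0 : PySem.Dict String String := PySem.Dict.mk site_data_all
  let res := site_list.foldl (fun (st : PySem.Dict String String × List String) site =>
    let inner := site_data_all.foldl (fun (p : PySem.Dict String String × Int) kv =>
      if PySem.Str.lower site == PySem.Str.lower kv.1 then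
        (p.1.insert kv.1 (d0.getD kv.1 ""), p.2 + 1)
      else p) (st.1, (0 : Int))
    if inner.2 == 0 then (inner.1, st.2 ++ ["'" ++ site ++ "'"]) else (inner.1, st.2))
    (PySem.Dict.mk [], [])
  (res.1.items, res.2)

-- ===== PORT B =====
-- B builds a dict 'index' (lowered key -> original keys, via setdefault/append = Dict.modify
-- with default []) in one pass, then resolves each site by a single lookup in it.
def build_site_data_alt (site_data_all : List (String × String)) (site_list : List String) :
    (List (String × String)) × List String :=
  let index : PySem.Dict String (List String) :=
    (site_data_all.map (fun kv => (PySem.Str.lower kv.1, kv.1))).foldl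
      (fun d p => d.modify p.1 [] (· ++ [p.2])) PySem.Dict.empty
  let d0 : PySem.Dict String String := PySem.Dict.mk site_data_all
  let res := site_list.foldl (fun (st : PySem.Dict String String × List String) site =>
    let keys := index.getD (PySem.Str.lower site) []
    if keys.isEmpty then (st.1, st.2 ++ ["'" ++ site ++ "'"])
    else (keys.foldl (fun sd k => sd.insert k (d0.getD k "")) st.1, st.2))
    (PySem.Dict.mk [], [])
  (res.1.items, res.2)

-- ===== PRECONDITION & SPEC =====
def Spec_build_site_data (site_data_all : List (String × String)) (site_list : List String) (out : (List (String × String)) × List String) : Prop := out = build_site_data_alt site_data_all site_list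
instance (site_data_all : List (String × String)) (site_list : List String) (out : (List (String × String)) × List String) : Decidable (Spec_build_site_data site_data_all site_list out) := by unfold Spec_build_site_data; infer_instance

-- ===== CLAIM (what is proved, stated in full; the proofs are below) =====
def Claim_equal_build_site_data : Prop := ∀ (site_data_all : List (String × String)) (site_list : List String), Dom_build_site_data site_data_all site_list → Spec_build_site_data site_data_all site_list (build_site_data site_data_all site_list)

-- ===== LEMMAS AND PROOFS =====

-- keys matched by `site` in data order (shared characterisation of both inner loops)
def pvMatched (site : String) (l : List (String × String)) : List String :=
  (l.filter (fun kv => PySem.Str.lower site == PySem.Str.lower kv.1)).map (·.1)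

-- A's inner scan accumulates exactly the inserts over pvMatched and counts them
theorem innerA_eq (d0 : PySem.Dict String String) (site : String)
    (l : List (String × String)) :
    ∀ (sd : PySem.Dict String String) (c : Int),
    l.foldl (fun (p : PySem.Dict String String × Int) kv =>
      if PySem.Str.lower site == PySem.Str.lower kv.1 then
        (p.1.insert kv.1 (d0.getD kv.1 ""), p.2 + 1)
      else p) (sd, c)
    = ((pvMatched site l).foldl (fun sd k => sd.insert k (d0.getD k "")) sd,
       c + ((pvMatched site l).length : Int)) := by
  induction l with
  | nil => intro sd c; simp [pvMatched]
  | cons kv t ih =>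
    intro sd c
    by_cases h : PySem.Str.lower site == PySem.Str.lower kv.1
    · simp only [List.foldl_cons, pvMatched, List.filter_cons, h, if_pos, List.map_cons,
        List.length_cons]
      rw [ih]
      simp [pvMatched]
      omega
    · simp only [List.foldl_cons, pvMatched, List.filter_cons, h]
      rw [ih]
      simp [pvMatched]

-- B's index lookup returns exactly pvMatched
theorem index_getD_eq (site : String) (l : List (String × String)) :
    ((l.map (fun kv => (PySem.Str.lower kv.1, kv.1))).foldl
      (fun d p => d.modify p.1 [] (· ++ [p.2])) PySem.Dict.empty).getD
        (PySem.Str.lower site) []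
    = pvMatched site l := by
  rw [PySem.Dict.getD_foldl_modify_append]
  simp only [PySem.Dict.getD_empty, List.nil_append, pvMatched]
  induction l with
  | nil => simp
  | cons kv t ih =>
    simp only [List.map_cons, List.filter_cons]
    have hcomm : (PySem.Str.lower kv.1 == PySem.Str.lower site)
        = (PySem.Str.lower site == PySem.Str.lower kv.1) := by
      rw [Bool.eq_iff_iff]
      simp only [beq_iff_eq]
      exact ⟨Eq.symm, Eq.symm⟩
    rw [hcomm]
    cases h : (PySem.Str.lower site == PySem.Str.lower kv.1) <;> simp [ih]

-- the per-site step of A equals the per-site step of B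
theorem step_eq (site_data_all : List (String × String)) (site : String)
    (st : PySem.Dict String String × List String) :
    (let inner := site_data_all.foldl (fun (p : PySem.Dict String String × Int) kv =>
      if PySem.Str.lower site == PySem.Str.lower kv.1 then
        (p.1.insert kv.1 ((PySem.Dict.mk site_data_all).getD kv.1 ""), p.2 + 1)
      else p) (st.1, (0 : Int))
     if inner.2 == 0 then (inner.1, st.2 ++ ["'" ++ site ++ "'"]) else (inner.1, st.2))
    = (let keys := ((site_data_all.map (fun kv => (PySem.Str.lower kv.1, kv.1))).foldl
        (fun d p => d.modify p.1 [] (· ++ [p.2])) PySem.Dict.empty).getD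
          (PySem.Str.lower site) []
       if keys.isEmpty then (st.1, st.2 ++ ["'" ++ site ++ "'"])
       else (keys.foldl (fun sd k =>
         sd.insert k ((PySem.Dict.mk site_data_all).getD k "")) st.1, st.2)) := by
  simp only [innerA_eq, index_getD_eq]
  by_cases h : (pvMatched site site_data_all).isEmpty
  · have hl : pvMatched site site_data_all = [] := by
      simpa [List.isEmpty_iff] using h
    simp [hl]
  · have hl : pvMatched site site_data_all ≠ [] := by
      simpa [List.isEmpty_iff] using h
    have hc : ((0 : Int) + ((pvMatched site site_data_all).length : Int) == 0) = false := by
      have := List.length_pos_iff.mpr hl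
      simp
      omega
    simp [hl]

-- ===== VERDICT (by name: the statement is the Claim_ definition above) =====
theorem build_site_data_spec : Claim_equal_build_site_data := by
  intro site_data_all site_list _
  unfold Spec_build_site_data build_site_data build_site_data_alt
  simp only
  refine congrArg (fun r : PySem.Dict String String × List String => (r.1.items, r.2)) ?_
  exact List.foldl_ext _ _ _ (fun st site _ => step_eq site_data_all site st)
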